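-- pv_equiv track=rewrite | github.com/euredact/euredact | euredact-python/src/euredact/rules/matchers.py | _extract_literal_prefix
-- ===== SOURCE A (Python) =====
-- def _extract_literal_prefix(pattern: str) -> str | None:
--     """Extract a literal prefix (>= 2 chars) from a regex pattern, skipping \\b."""
--     prefix: list[str] = []
--     i = 0
--     while i < len(pattern):
--         ch = pattern[i]
--         if ch == "\\" and i + 1 < len(pattern) and pattern[i + 1] == "b":
--             i += 2
--             continue
--         if ch in r"\[](){}*+?|^$.":
--             break
--         prefix.append(ch)
--         i += 1
--     result = "".join(prefix)
--     return result if len(result) >= 2 else None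
-- ===== SOURCE B (Python) =====
-- def _extract_literal_prefix(pattern: str) -> str | None:
--     """Delete \\b markers, then cut at the minimum of the first occurrences of each metachar."""
--     cleaned = pattern.replace('\\b', '')
--     cut = len(cleaned)
--     for m in r"\[](){}*+?|^$.":
--         j = cleaned.find(m)
--         if j != -1 and j < cut:
--             cut = j
--     result = cleaned[:cut]
--     return result if len(result) >= 2 else None
-- ===== Notes on version B (the rewrite author's own statement) =====
-- stated objective: faster
-- what changed: Replaces A's single stateful per-character index scan (manual \b skipping, append per char, explicit break) by a staged pipeline: str.replace deletes all '\b' markers, then the cut position is computed as the minimum over the 14 metacharacters of their first occurrence (str.find), and the prefix is one slice.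
import Mathlib
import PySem

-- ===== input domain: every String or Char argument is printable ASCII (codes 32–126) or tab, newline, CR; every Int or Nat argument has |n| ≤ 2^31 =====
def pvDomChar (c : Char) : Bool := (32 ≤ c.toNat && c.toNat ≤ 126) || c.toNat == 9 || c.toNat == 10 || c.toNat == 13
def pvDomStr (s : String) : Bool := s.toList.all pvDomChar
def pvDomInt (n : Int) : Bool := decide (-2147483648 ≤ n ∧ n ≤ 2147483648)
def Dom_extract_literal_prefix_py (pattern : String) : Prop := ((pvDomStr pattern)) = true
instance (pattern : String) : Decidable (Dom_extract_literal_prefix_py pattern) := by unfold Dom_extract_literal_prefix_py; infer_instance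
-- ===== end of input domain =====

-- B replaces A's stateful index scan by a staged pipeline: delete '\b' markers, compute the cut
-- position as the minimum first occurrence of any metacharacter, slice once (C-level primitives instead of a per-character interpreted loop); objective: faster.

-- ===== PORT A =====
-- A's while loop over the index i, as structural recursion on the remaining characters:
-- first branch: ch == '\\' and pattern[i+1] == 'b' → skip both; second: ch a break char → stop;
-- else append ch and advance.
def pvLoopA : List Char → List Char
  | [] => []
  | '\\' :: 'b' :: rest => pvLoopA rest
  | c :: rest =>
    if ("\\[](){}*+?|^$.".toList).contains c then [] else c :: pvLoopA rest

def extract_literal_prefix_py (pattern : String) : Option String :=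
  let result := pvLoopA pattern.toList
  if result.length ≥ 2 then some (String.ofList result) else none

-- ===== PORT B =====
-- Source B's cleaned = pattern.replace('\\b', ''): left-to-right non-overlapping removal of the
-- two-character sequence '\' 'b' (exact port of str.replace with empty replacement).
def pvClean : List Char → List Char
  | [] => []
  | '\\' :: 'b' :: rest => pvClean rest
  | c :: rest => c :: pvClean rest

-- Source B's cleaned.find(m) for a single character m: first index, or -1 when absent (exact).
def pvFind (m : Char) (l : List Char) : Int :=
  if l.contains m then ((l.idxOf m : Nat) : Int) else -1

-- Source B's loop body: 'j = cleaned.find(m); if j != -1 and j < cut: cut = j'.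
def pvCutStep (g : Char → Int) (cut : Int) (m : Char) : Int :=
  if g m ≠ -1 ∧ g m < cut then g m else cut

def extract_literal_prefix_py_alt (pattern : String) : Option String :=
  let cleaned := pvClean pattern.toList
  let cut := ("\\[](){}*+?|^$.".toList).foldl (pvCutStep (fun m => pvFind m cleaned)) (cleaned.length : Int)
  -- cleaned[:cut] with 0 ≤ cut ≤ len(cleaned) by construction of the loop
  let result := cleaned.take cut.toNat
  if result.length ≥ 2 then some (String.ofList result) else none

-- ===== PRECONDITION & SPEC =====
def Spec_extract_literal_prefix_py (pattern : String) (out : Option String) : Prop := out = extract_literal_prefix_py_alt pattern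
instance (pattern : String) (out : Option String) : Decidable (Spec_extract_literal_prefix_py pattern out) := by unfold Spec_extract_literal_prefix_py; infer_instance

-- ===== CLAIM (what is proved, stated in full; the proofs are below) =====
def Claim_equal_extract_literal_prefix_py : Prop := ∀ (pattern : String), Dom_extract_literal_prefix_py pattern → Spec_extract_literal_prefix_py pattern (extract_literal_prefix_py pattern)

-- ===== LEMMAS AND PROOFS =====

def pvBreakB (c : Char) : Bool := ("\\[](){}*+?|^$.".toList).contains c

-- A's scan equals "delete \b pairs, then take the metachar-free prefix".
theorem pvLoopA_eq_clean_takeWhile (l : List Char) :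
    pvLoopA l = (pvClean l).takeWhile (fun c => ¬ pvBreakB c) := by
  induction l using pvLoopA.induct with
  | case1 => simp [pvLoopA, pvClean]
  | case2 rest ih => simpa [pvLoopA, pvClean] using ih
  | case3 c rest hne hc =>
    simp_all [pvLoopA, pvClean, List.takeWhile, pvBreakB]
    rcases hc with rfl|rfl|rfl|rfl|rfl|rfl|rfl|rfl|rfl|rfl|rfl|rfl|rfl|rfl <;> rfl
  | case4 c rest hne hc ih =>
    simp_all [pvLoopA, pvClean, pvBreakB]

-- the min-fold never increases its accumulator
theorem pvCutFold_le_init (g : Char → Int) (ms : List Char) (init : Int) :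
    ms.foldl (pvCutStep g) init ≤ init := by
  induction ms generalizing init with
  | nil => simp
  | cons m ms ih =>
    simp only [List.foldl_cons]
    calc ms.foldl (pvCutStep g) (pvCutStep g init m) ≤ pvCutStep g init m := ih _
      _ ≤ init := by unfold pvCutStep; split <;> omega

-- the min-fold stays ≥ 0 when init and all present finds are ≥ 0
theorem pvCutFold_nonneg (g : Char → Int) (ms : List Char) (hg : ∀ m, g m ≠ -1 → 0 ≤ g m) :
    ∀ init : Int, 0 ≤ init → 0 ≤ ms.foldl (pvCutStep g) init := by
  induction ms with
  | nil => intro init h0; simpa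
  | cons m ms ih =>
    intro init h0
    simp only [List.foldl_cons]
    apply ih
    unfold pvCutStep
    split
    · next h => exact hg m h.1
    · exact h0

-- the min-fold is ≤ any present value of a processed character
theorem pvCutFold_le_mem (g : Char → Int) (ms : List Char) (m : Char) (hne : g m ≠ -1) :
    ∀ init : Int, m ∈ ms → ms.foldl (pvCutStep g) init ≤ g m := by
  induction ms with
  | nil => intro init h; cases h
  | cons m' ms ih =>
    intro init hm
    simp only [List.foldl_cons]
    rcases List.mem_cons.mp hm with rfl | hm'
    · calc ms.foldl (pvCutStep g) (pvCutStep g init m) ≤ pvCutStep g init m :=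
        pvCutFold_le_init _ _ _
        _ ≤ g m := by
          unfold pvCutStep
          split
          · omega
          · next h => push Not at h; exact h hne
    · exact ih _ hm'

-- pvFind is ≥ 0 whenever it is not -1
theorem pvFind_nonneg (m : Char) (l : List Char) (h : pvFind m l ≠ -1) : 0 ≤ pvFind m l := by
  unfold pvFind at *
  split <;> simp_all

-- on a cons whose head differs from every break char, all finds shift by one
theorem pvFind_cons_ne (m c : Char) (l : List Char) (hne : m ≠ c) :
    pvFind m (c :: l) = (if pvFind m l = -1 then -1 else pvFind m l + 1) := by
  unfold pvFind
  have hbeq : (m == c) = false := by simpa using hne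
  have hcont : (c :: l).contains m = l.contains m := by
    simp
    exact fun h => absurd h hne
  rw [hcont]
  split
  · rw [List.idxOf_cons_ne _ (by simpa [eq_comm] using hne)]
    split
    · next h _ => simp_all
    · push_cast; omega
  · simp

-- shifted values + shifted init shift the whole fold
theorem pvCutFold_shift (g g' : Char → Int) (ms : List Char) :
    ∀ init : Int, (∀ m ∈ ms, g' m = (if g m = -1 then -1 else g m + 1)) →
      (∀ m ∈ ms, g m ≠ -1 → 0 ≤ g m) →
      ms.foldl (pvCutStep g') (init + 1) = ms.foldl (pvCutStep g) init + 1 := by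
  induction ms with
  | nil => intro init _ _; simp
  | cons m ms ih =>
    intro init h hg
    simp only [List.foldl_cons]
    have hstep : pvCutStep g' (init + 1) m = pvCutStep g init m + 1 := by
      unfold pvCutStep
      rw [h m List.mem_cons_self]
      by_cases hm1 : g m = -1
      · simp [hm1]
      · have h0 : 0 ≤ g m := hg m List.mem_cons_self hm1
        simp only [hm1, if_false]
        split_ifs <;> omega
    rw [hstep, ih _ (fun m' hm' => h m' (List.mem_cons_of_mem _ hm'))
      (fun m' hm' => hg m' (List.mem_cons_of_mem _ hm'))]

-- the computed cut equals the length of the metachar-free prefix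
theorem pvCut_eq (l : List Char) :
    ("\\[](){}*+?|^$.".toList).foldl (pvCutStep (fun m => pvFind m l)) (l.length : Int)
      = ((l.takeWhile (fun c => ¬ pvBreakB c)).length : Int) := by
  induction l with
  | nil => decide
  | cons c rest ih =>
    by_cases hb : pvBreakB c
    · have hmem : c ∈ "\\[](){}*+?|^$.".toList := by
        simpa [pvBreakB, List.contains_iff_mem] using hb
      have hfind : pvFind c (c :: rest) = 0 := by
        simp [pvFind]
      have h1 : ("\\[](){}*+?|^$.".toList).foldl (pvCutStep (fun m => pvFind m (c :: rest)))
          (((c :: rest).length : Nat) : Int) ≤ pvFind c (c :: rest) :=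
        pvCutFold_le_mem _ _ c (by rw [hfind]; decide) _ hmem
      have h2 : (0 : Int) ≤ ("\\[](){}*+?|^$.".toList).foldl (pvCutStep (fun m => pvFind m (c :: rest)))
          (((c :: rest).length : Nat) : Int) :=
        pvCutFold_nonneg _ _ (fun m => pvFind_nonneg m (c :: rest)) _ (by positivity)
      rw [hfind] at h1
      have hres : (List.takeWhile (fun c => ¬ pvBreakB c) (c :: rest)).length = 0 := by
        simp [List.takeWhile, hb]
      rw [hres]
      omega
    · have hne : ∀ m ∈ "\\[](){}*+?|^$.".toList, m ≠ c := by
        intro m hm rfl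
        exact hb (by simpa [pvBreakB, List.contains_iff_mem] using hm)
      have hshift := pvCutFold_shift (fun m => pvFind m rest) (fun m => pvFind m (c :: rest))
        ("\\[](){}*+?|^$.".toList) (rest.length : Int)
        (fun m hm => pvFind_cons_ne m c rest (hne m hm))
        (fun m _ => pvFind_nonneg m rest)
      have hlen : (((c :: rest).length : Nat) : Int) = (rest.length : Int) + 1 := by
        push_cast [List.length_cons]; ring
      rw [hlen, hshift, ih]
      simp [List.takeWhile, hb]

-- ===== VERDICT (by name: the statement is the Claim_ definition above) =====
theorem extract_literal_prefix_py_spec : Claim_equal_extract_literal_prefix_py := by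
  intro pattern _
  unfold Spec_extract_literal_prefix_py extract_literal_prefix_py extract_literal_prefix_py_alt
  simp only [pvLoopA_eq_clean_takeWhile, pvCut_eq, Int.toNat_natCast]
  rw [← List.prefix_iff_eq_take.mp (List.takeWhile_prefix _)]
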